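-- pv_equiv track=rewrite | github.com/riccardoNovaglia/advent-of-code-2021 | src/day3/diagnostic.py | oxygen_and_co2_ratings
-- ===== SOURCE A (Python) =====
-- def diagnose(readings: [str]) -> (str, str):
--     readings_length = len(readings[0].strip())
--
--     gamma = ""
--     for i in range(readings_length):
--         stream = [reading[i] for reading in readings]
--         if stream.count("0") > len(stream) / 2:
--             gamma += "0"
--         elif stream.count("0") == len(stream) / 2:
--             gamma += "1"
--         else:
--             gamma += "1"
--
--     epsilon = "".join(["0" if digit == "1" else "1" for digit in gamma])
--     return gamma, epsilon
--
-- def oxygen_and_co2_ratings(readings: [str]) -> (str, str):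
--     oxygen_candidates = readings.copy()
--     bit_index = 0
--     while len(set(oxygen_candidates)) != 1:
--         gamma, _ = diagnose(oxygen_candidates)
--         popular = gamma[bit_index]
--         oxygen_candidates = list(
--             filter(lambda reading: reading[bit_index] == popular, oxygen_candidates)
--         )
--         bit_index += 1
--
--     co2_candidates = readings.copy()
--     bit_index = 0
--     while len(set(co2_candidates)) != 1:
--         _, epsilon = diagnose(co2_candidates)
--         least_popular = epsilon[bit_index]
--         co2_candidates = list(
--             filter(lambda reading: reading[bit_index] == least_popular, co2_candidates)
--         )
--         bit_index += 1
--         _, epsilon = diagnose(co2_candidates)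
--
--     return oxygen_candidates[0], co2_candidates[0]
-- ===== SOURCE B (Python) =====
-- def oxygen_and_co2_ratings(readings: [str]) -> (str, str):
--     # Sort once; each rating walk narrows an index window [lo, hi) of the sorted
--     # list instead of rebuilding filtered candidate lists.
--     srt = sorted(readings)
--
--     def rating(keep_most_common):
--         lo, hi = 0, len(srt)
--         i = 0
--         while srt[lo] != srt[hi - 1]:
--             mid = lo
--             while mid < hi and srt[mid][i] == "0":
--                 mid += 1
--             if (mid - lo > hi - mid) == keep_most_common:
--                 hi = mid
--             else:
--                 lo = mid
--             i += 1
--         return srt[lo]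
--
--     return rating(True), rating(False)
-- ===== Notes on version B (the rewrite author's own statement) =====
-- stated objective: faster
-- what changed: B sorts the readings once and computes each rating by narrowing an index window [lo,hi) over the sorted array (finding the 0/1 split point of the current column inside the window), instead of A's per-round rebuilding of filtered candidate lists with a full re-diagnosis of every bit position and a set() construction each round; …
-- outside the precondition, e.g. on oxygen_and_co2_ratings(['1', 'cx 10cab ', '0', '0', '0', '0']): A returns ('0', '1'), B raises IndexError; on oxygen_and_co2_ratings(['0', '10']): A returns ('10', '0'), B returns ('10', '0')
import Mathlib
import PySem

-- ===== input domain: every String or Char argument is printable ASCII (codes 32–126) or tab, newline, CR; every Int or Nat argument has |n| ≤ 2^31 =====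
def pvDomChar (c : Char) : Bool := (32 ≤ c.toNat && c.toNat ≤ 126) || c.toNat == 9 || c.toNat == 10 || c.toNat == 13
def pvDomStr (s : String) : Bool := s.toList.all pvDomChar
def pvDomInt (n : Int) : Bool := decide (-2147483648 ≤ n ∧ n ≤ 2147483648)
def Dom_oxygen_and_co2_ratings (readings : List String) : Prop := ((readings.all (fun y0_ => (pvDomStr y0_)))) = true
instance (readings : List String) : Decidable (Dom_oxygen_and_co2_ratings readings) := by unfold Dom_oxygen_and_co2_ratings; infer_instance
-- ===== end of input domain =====

-- B sorts the readings once and computes each rating by narrowing an index window [lo, hi) of the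
-- sorted array, instead of A's repeated candidate-list filtering with a full re-diagnosis of every
-- bit position per round; measurably faster (no per-round list rebuilds or whole-width recounts).

-- ===== PORT A =====
-- helper `diagnose` of A; `readings[0]` on [] raises IndexError in Python (excluded by Pre_): `headD ""` here
def pvDiagnose (readings : List String) : String × String :=
  let readingsLength : Int := PySem.Str.len (PySem.Str.strip (readings.headD ""))
  let gamma : List Char :=
    (PySem.List.pyRange 0 readingsLength 1).foldl
      (fun g i =>
        -- stream = [reading[i] for reading in readings]; reading[i] raises IndexError out of range (outside Pre_)
        let stream : List Char := readings.map (fun r => (PySem.Str.pyGet? r i).getD '?')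
        -- `stream.count("0") > len(stream) / 2` (and `==`): the float comparison is exact, written as 2*count vs len
        g ++ [if 2 * (PySem.List.count stream '0' : Int) > (stream.length : Int) then '0'
              else if 2 * (PySem.List.count stream '0' : Int) = (stream.length : Int) then '1'
              else '1'])
      []
  (String.ofList gamma, String.ofList (gamma.map (fun digit => if digit = '1' then '0' else '1')))

-- `while len(set(oxygen_candidates)) != 1:` as fuel recursion; the fuel passed below suffices
-- wherever the Python loop terminates (every input admitted by Pre_)
def pvOxyLoop : Nat → List String → Int → List String
  | 0, cands, _ => cands
  | fuel + 1, cands, bitIndex =>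
    if PySem.Set.len (PySem.Set.ofList cands) = 1 then cands
    else
      pvOxyLoop fuel
        (cands.filter (fun reading =>
          (PySem.Str.pyGet? reading bitIndex).getD '?'
            = (PySem.Str.pyGet? (pvDiagnose cands).1 bitIndex).getD '?'))  -- popular = gamma[bit_index]
        (bitIndex + 1)

-- CO2 loop; the Python re-runs `diagnose` on the freshly filtered list at the end of the body, but that
-- value is discarded (observable only as an exception on an emptied list, excluded by Pre_), so no term here
def pvCo2Loop : Nat → List String → Int → List String
  | 0, cands, _ => cands
  | fuel + 1, cands, bitIndex =>
    if PySem.Set.len (PySem.Set.ofList cands) = 1 then cands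
    else
      pvCo2Loop fuel
        (cands.filter (fun reading =>
          (PySem.Str.pyGet? reading bitIndex).getD '?'
            = (PySem.Str.pyGet? (pvDiagnose cands).2 bitIndex).getD '?'))  -- least_popular = epsilon[bit_index]
        (bitIndex + 1)

-- `candidates[0]` raises IndexError on [] (excluded by Pre_): `headD ""` here
def oxygen_and_co2_ratings (readings : List String) : String × String :=
  let fuel := (readings.headD "").toList.length + 1
  ((pvOxyLoop fuel readings 0).headD "", (pvCo2Loop fuel readings 0).headD "")

-- ===== PORT B =====
-- inner `while mid < hi and srt[mid][i] == "0": mid += 1` of Source B; fuel (hi - lo).toNat covers every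
-- iteration exactly (mid moves by 1 toward hi); srt[mid][i] raises only outside Pre_: `getD` here
def pvScanZeros (srt : List String) (hi i : Int) : Nat → Int → Int
  | 0, mid => mid
  | f + 1, mid =>
    if mid < hi ∧ (PySem.Str.pyGet? ((PySem.List.pyGet? srt mid).getD "") i).getD '?' = '0'
    then pvScanZeros srt hi i f (mid + 1) else mid

-- outer `while srt[lo] != srt[hi - 1]:` of Source B as fuel recursion, same fuel convention as the A port
def pvWalkLoop (keep : Bool) (srt : List String) : Nat → Int → Int → Int → Int
  | 0, lo, _, _ => lo
  | f + 1, lo, hi, i =>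
    if (PySem.List.pyGet? srt lo).getD "" ≠ (PySem.List.pyGet? srt (hi - 1)).getD "" then
      let mid := pvScanZeros srt hi i (hi - lo).toNat lo
      if (decide (mid - lo > hi - mid)) = keep then pvWalkLoop keep srt f lo mid (i + 1)
      else pvWalkLoop keep srt f mid hi (i + 1)
    else lo

def oxygen_and_co2_ratings_alt (readings : List String) : String × String :=
  let srt := PySem.List.sorted readings (fun x => x) false
  let fuel := (readings.headD "").toList.length + 1
  ((PySem.List.pyGet? srt (pvWalkLoop true srt fuel 0 (srt.length : Int) 0)).getD "",
   (PySem.List.pyGet? srt (pvWalkLoop false srt fuel 0 (srt.length : Int) 0)).getD "")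

-- ===== PRECONDITION & SPEC =====
-- CO2 survivability: A raises IndexError exactly when its minority-bit filter empties the candidate
-- list (a unanimous column among still-distinct candidates); this path-dependent condition has no
-- simpler closed form. Self-contained: shares no definition with either port.
def pvCo2Safe : List String → List Nat → Bool
  | _, [] => true
  | c, i :: rest =>
    if c.all (fun r => r == c.headD "") then true
    else
      let next := c.filter (fun r =>
        r.toList[i]? = some (if 2 * c.countP (fun r => r.toList[i]? = some '0') > c.length then '1' else '0'))
      if next.isEmpty then false else pvCo2Safe next rest

-- Pre_ excludes the inputs where A raises IndexError (empty list, a CO2 filter that empties its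
-- candidates, indexing past a reading) and, because the equivalence argument is about the bit-criteria
-- process, the not-all-equal lists of unequal-length or non-binary strings, on which A's occasional
-- normal return is an accident of mismatching filters.
def Pre_oxygen_and_co2_ratings (readings : List String) : Prop :=
  readings ≠ [] ∧
  ((readings.all (fun x => x == readings.headD "")) = true ∨
    ((readings.all (fun r => r.toList.length == (readings.headD "").toList.length &&
        r.toList.all (fun ch => ch == '0' || ch == '1'))) = true ∧
      pvCo2Safe readings (List.range (readings.headD "").toList.length) = true))
instance (readings : List String) : Decidable (Pre_oxygen_and_co2_ratings readings) := by
  unfold Pre_oxygen_and_co2_ratings; infer_instance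

def pvWitness_oxygen_and_co2_ratings : List String := ["00", "01", "10", "11"]

def Spec_oxygen_and_co2_ratings (readings : List String) (out : String × String) : Prop := out = oxygen_and_co2_ratings_alt readings
instance (readings : List String) (out : String × String) : Decidable (Spec_oxygen_and_co2_ratings readings out) := by unfold Spec_oxygen_and_co2_ratings; infer_instance

-- ===== CLAIM (what is proved, stated in full; the proofs are below) =====
def Claim_equal_oxygen_and_co2_ratings : Prop := ∀ (readings : List String), Dom_oxygen_and_co2_ratings readings → Pre_oxygen_and_co2_ratings readings → Spec_oxygen_and_co2_ratings readings (oxygen_and_co2_ratings readings)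

-- ===== LEMMAS AND PROOFS =====

-- proof-only intermediate: A's two loops in one parameterized form, counting only column `bitIndex`
def pvRateLoop (keepMostCommon : Bool) : Nat → List String → Int → List String
  | 0, cands, _ => cands
  | fuel + 1, cands, i =>
    if PySem.List.count cands (cands.headD "") = cands.length then cands
    else
      let zeros : Int := cands.foldl
        (fun z reading => if (PySem.Str.pyGet? reading i).getD '?' = '0' then z + 1 else z) 0
      let bit : Char :=
        if keepMostCommon then (if 2 * zeros > (cands.length : Int) then '0' else '1')
        else (if 2 * zeros > (cands.length : Int) then '1' else '0')
      pvRateLoop keepMostCommon fuel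
        (cands.filter (fun r => (PySem.Str.pyGet? r i).getD '?' = bit)) (i + 1)

lemma pvHeadD_mem (c : List String) (hne : c ≠ []) : c.headD "" ∈ c := by
  cases c with
  | nil => simp_all
  | cons a t => simp

lemma pvStr_ext {s t : String} (h : s.toList = t.toList) : s = t := by
  have := congrArg String.ofList h
  simpa [String.ofList_toList] using this

-- dropWhile leaves a list none of whose elements satisfy the predicate
lemma pvDropWhile_eq_self {p : Char → Bool} {l : List Char} (h : ∀ x ∈ l, p x = false) :
    l.dropWhile p = l := by
  cases l with
  | nil => simp
  | cons a t => simp_all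

lemma pvStrip_self (cs : List Char) (h : ∀ ch ∈ cs, ch = '0' ∨ ch = '1') :
    PySem.Chars.strip cs = cs := by
  have hsp : ∀ x ∈ cs, PySem.Chars.isspace x = false := by
    intro x hx
    rcases h x hx with rfl | rfl <;> decide
  unfold PySem.Chars.strip PySem.Chars.lstrip PySem.Chars.rstrip
  rw [pvDropWhile_eq_self hsp]
  rw [pvDropWhile_eq_self (by intro x hx; exact hsp x (by simpa using hx))]
  simp

lemma pvSetLen_one_iff (c : List String) (hne : c ≠ []) :
    (PySem.Set.len (PySem.Set.ofList c) = 1) ↔ ∀ x ∈ c, x = c.headD "" := by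
  have hlen1 : PySem.Set.len (PySem.Set.ofList c) = 1 ↔ (PySem.Set.ofList c).length = 1 := by
    unfold PySem.Set.len
    exact_mod_cast Iff.rfl
  rw [hlen1]
  constructor
  · intro h x hx
    obtain ⟨a, ha⟩ := List.length_eq_one_iff.mp h
    have hx' : x = a := by
      have := (PySem.Set.mem_ofList c x).mpr hx
      rw [ha] at this; simpa using this
    have hh' : c.headD "" = a := by
      have := (PySem.Set.mem_ofList c (c.headD "")).mpr (pvHeadD_mem c hne)
      rw [ha] at this; simpa using this
    rw [hx', hh']
  · intro h
    have hmem : c.headD "" ∈ PySem.Set.ofList c :=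
      (PySem.Set.mem_ofList c _).mpr (pvHeadD_mem c hne)
    have hnd := PySem.Set.nodup_ofList c
    have hall : ∀ x ∈ PySem.Set.ofList c, x = c.headD "" := by
      intro x hx
      exact h x ((PySem.Set.mem_ofList c x).mp hx)
    cases hs : PySem.Set.ofList c with
    | nil => rw [hs] at hmem; simp at hmem
    | cons a t =>
      rw [hs] at hall hnd
      cases t with
      | nil => simp
      | cons b t' =>
        have ha : a = c.headD "" := hall a (by simp)
        have hb : b = c.headD "" := hall b (by simp)
        rw [List.nodup_cons] at hnd
        exact absurd (by simp [ha, hb] : a ∈ b :: t') hnd.1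

lemma pvCount_headD_iff (c : List String) :
    (PySem.List.count c (c.headD "") = c.length) ↔ ∀ x ∈ c, x = c.headD "" := by
  rw [PySem.List.count_eq, List.count_eq_length]
  constructor
  · intro h x hx; exact (h x hx).symm
  · intro h x hx; exact (h x hx).symm

lemma pvIdx_lt (c : List String) (L : Nat) (i : Nat) (hne : c ≠ [])
    (hlen : ∀ r ∈ c, r.toList.length = L)
    (hagree : ∀ r ∈ c, ∀ s ∈ c, r.toList.take i = s.toList.take i)
    (hnall : ¬ ∀ x ∈ c, x = c.headD "") : i < L := by
  by_contra hge
  rw [Nat.not_lt] at hge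
  apply hnall
  intro x hx
  have hhd := pvHeadD_mem c hne
  have h := hagree x hx _ hhd
  rw [List.take_of_length_le (le_trans (le_of_eq (hlen x hx)) hge),
      List.take_of_length_le (le_trans (le_of_eq (hlen _ hhd)) hge)] at h
  exact pvStr_ext h

-- B's zeros accumulator is the count of '0' in A's column stream
lemma pvZeros_eq (c : List String) (i : Int) :
    c.foldl (fun z reading => if (PySem.Str.pyGet? reading i).getD '?' = '0' then z + 1 else z) (0 : Int)
      = (PySem.List.count (c.map (fun r => (PySem.Str.pyGet? r i).getD '?')) '0' : Int) := by
  rw [PySem.List.foldl_ite_add_one (fun r => (PySem.Str.pyGet? r i).getD '?' = '0') c 0,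
      PySem.List.count_eq, List.count_eq_countP, List.countP_map, zero_add]
  exact_mod_cast List.countP_congr (fun x _ => by simp [Function.comp])

-- gamma[i] of `diagnose`, for equal-length binary candidates and i in range
lemma pvGamma_get (c : List String) (L : Nat) (hne : c ≠ [])
    (hlen : ∀ r ∈ c, r.toList.length = L)
    (hbin : ∀ r ∈ c, ∀ ch ∈ r.toList, ch = '0' ∨ ch = '1')
    (i : Nat) (hi : i < L) :
    (PySem.Str.pyGet? (pvDiagnose c).1 ((i : Nat) : Int)).getD '?'
      = (if 2 * (PySem.List.count (c.map (fun r => (PySem.Str.pyGet? r ((i : Nat) : Int)).getD '?')) '0' : Int) > (c.length : Int)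
         then '0' else '1') := by
  have hL : PySem.Str.len (PySem.Str.strip (c.headD "")) = (L : Int) := by
    rw [PySem.Str.len_eq, PySem.Str.toList_strip, pvStrip_self _ (hbin _ (pvHeadD_mem c hne)),
        hlen _ (pvHeadD_mem c hne)]
  simp only [pvDiagnose, hL]
  rw [PySem.List.foldl_append_singleton_eq_map
        (fun j => if 2 * (PySem.List.count (c.map (fun r => (PySem.Str.pyGet? r j).getD '?')) '0' : Int) > ((c.map (fun r => (PySem.Str.pyGet? r j).getD '?')).length : Int) then '0'
                  else if 2 * (PySem.List.count (c.map (fun r => (PySem.Str.pyGet? r j).getD '?')) '0' : Int) = ((c.map (fun r => (PySem.Str.pyGet? r j).getD '?')).length : Int) then '1'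
                  else '1')]
  rw [List.nil_append, PySem.Str.pyGet?_natCast]
  simp only [String.toList_ofList]
  rw [PySem.List.getElem?_map_pyRange_zero _ L i hi]
  simp only [Option.getD_some, List.length_map]
  split_ifs <;> rfl

-- epsilon[i] of `diagnose` is the flipped gamma bit
lemma pvEpsilon_get (c : List String) (L : Nat) (hne : c ≠ [])
    (hlen : ∀ r ∈ c, r.toList.length = L)
    (hbin : ∀ r ∈ c, ∀ ch ∈ r.toList, ch = '0' ∨ ch = '1')
    (i : Nat) (hi : i < L) :
    (PySem.Str.pyGet? (pvDiagnose c).2 ((i : Nat) : Int)).getD '?'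
      = (if 2 * (PySem.List.count (c.map (fun r => (PySem.Str.pyGet? r ((i : Nat) : Int)).getD '?')) '0' : Int) > (c.length : Int)
         then '1' else '0') := by
  have hL : PySem.Str.len (PySem.Str.strip (c.headD "")) = (L : Int) := by
    rw [PySem.Str.len_eq, PySem.Str.toList_strip, pvStrip_self _ (hbin _ (pvHeadD_mem c hne)),
        hlen _ (pvHeadD_mem c hne)]
  simp only [pvDiagnose, hL]
  rw [PySem.List.foldl_append_singleton_eq_map
        (fun j => if 2 * (PySem.List.count (c.map (fun r => (PySem.Str.pyGet? r j).getD '?')) '0' : Int) > ((c.map (fun r => (PySem.Str.pyGet? r j).getD '?')).length : Int) then '0'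
                  else if 2 * (PySem.List.count (c.map (fun r => (PySem.Str.pyGet? r j).getD '?')) '0' : Int) = ((c.map (fun r => (PySem.Str.pyGet? r j).getD '?')).length : Int) then '1'
                  else '1')]
  rw [List.nil_append, List.map_map, PySem.Str.pyGet?_natCast]
  simp only [String.toList_ofList]
  rw [PySem.List.getElem?_map_pyRange_zero _ L i hi]
  simp only [Option.getD_some, Function.comp, List.length_map]
  split_ifs <;> simp_all

lemma pvOxyLoop_nil (f : Nat) : ∀ i, pvOxyLoop f [] i = [] := by
  induction f with
  | zero => intro i; rfl
  | succ f ih =>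
    intro i
    simp only [pvOxyLoop, List.filter_nil]
    rw [if_neg (by simp [PySem.Set.len, PySem.Set.ofList_nil])]
    exact ih _

lemma pvCo2Loop_nil (f : Nat) : ∀ i, pvCo2Loop f [] i = [] := by
  induction f with
  | zero => intro i; rfl
  | succ f ih =>
    intro i
    simp only [pvCo2Loop, List.filter_nil]
    rw [if_neg (by simp [PySem.Set.len, PySem.Set.ofList_nil])]
    exact ih _

lemma pvRateLoop_nil (k : Bool) (f : Nat) (i : Int) : pvRateLoop k f [] i = [] := by
  cases f with
  | zero => rfl
  | succ f =>
    simp only [pvRateLoop]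
    rw [if_pos (by simp [PySem.List.count_eq])]

lemma pvOxyLoop_stop (f : Nat) (c : List String) (i : Int) (hne : c ≠ [])
    (hall : ∀ x ∈ c, x = c.headD "") : pvOxyLoop (f + 1) c i = c := by
  simp only [pvOxyLoop]
  rw [if_pos ((pvSetLen_one_iff c hne).mpr hall)]

lemma pvCo2Loop_stop (f : Nat) (c : List String) (i : Int) (hne : c ≠ [])
    (hall : ∀ x ∈ c, x = c.headD "") : pvCo2Loop (f + 1) c i = c := by
  simp only [pvCo2Loop]
  rw [if_pos ((pvSetLen_one_iff c hne).mpr hall)]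

lemma pvRateLoop_stop (k : Bool) (f : Nat) (c : List String) (i : Int)
    (hall : ∀ x ∈ c, x = c.headD "") : pvRateLoop k (f + 1) c i = c := by
  simp only [pvRateLoop]
  rw [if_pos ((pvCount_headD_iff c).mpr hall)]

-- agreement on the first i+1 characters after filtering on character i
lemma pvAgree_step (c : List String) (L : Nat) (i : Nat) (hi : i < L)
    (hlen : ∀ r ∈ c, r.toList.length = L)
    (hagree : ∀ r ∈ c, ∀ s ∈ c, r.toList.take i = s.toList.take i) (b : Char) :
    ∀ r ∈ c.filter (fun r => (PySem.Str.pyGet? r (i : Int)).getD '?' = b),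
    ∀ s ∈ c.filter (fun r => (PySem.Str.pyGet? r (i : Int)).getD '?' = b),
      r.toList.take (i + 1) = s.toList.take (i + 1) := by
  intro r hr s hs
  rw [List.mem_filter] at hr hs
  have hchar : ∀ t ∈ c, (PySem.Str.pyGet? t (i : Int)).getD '?' = b → t.toList[i]? = some b := by
    intro t ht hb
    rw [PySem.Str.pyGet?_natCast] at hb
    have : i < t.toList.length := by rw [hlen t ht]; exact hi
    rw [List.getElem?_eq_getElem this] at hb ⊢
    simp at hb
    simp [hb]
  rw [List.take_add_one, List.take_add_one, hagree r hr.1 s hs.1,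
      hchar r hr.1 (by simpa using hr.2), hchar s hs.1 (by simpa using hs.2)]

lemma pvOxyLoop_eq (L : Nat) : ∀ (fuel : Nat) (c : List String) (i : Nat),
    c ≠ [] →
    (∀ r ∈ c, r.toList.length = L) →
    (∀ r ∈ c, ∀ ch ∈ r.toList, ch = '0' ∨ ch = '1') →
    (∀ r ∈ c, ∀ s ∈ c, r.toList.take i = s.toList.take i) →
    pvOxyLoop fuel c (i : Int) = pvRateLoop true fuel c (i : Int) := by
  intro fuel
  induction fuel with
  | zero => intro c i _ _ _ _; rfl
  | succ f ih =>
    intro c i hne hlen hbin hagree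
    by_cases hall : ∀ x ∈ c, x = c.headD ""
    · rw [pvOxyLoop_stop f c _ hne hall, pvRateLoop_stop true f c _ hall]
    · have hi : i < L := pvIdx_lt c L i hne hlen hagree hall
      have hbit : (PySem.Str.pyGet? (pvDiagnose c).1 ((i : Nat) : Int)).getD '?'
          = (if 2 * (c.foldl (fun z reading => if (PySem.Str.pyGet? reading ((i : Nat) : Int)).getD '?' = '0' then z + 1 else z) (0 : Int)) > (c.length : Int) then '0' else '1') := by
        rw [pvZeros_eq, pvGamma_get c L hne hlen hbin i hi]
      simp only [pvOxyLoop, pvRateLoop, if_true]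
      rw [if_neg (by rw [pvSetLen_one_iff c hne]; exact hall),
          if_neg (by rw [pvCount_headD_iff c]; exact hall)]
      rw [hbit]
      set b := (if 2 * (c.foldl (fun z reading => if (PySem.Str.pyGet? reading ((i : Nat) : Int)).getD '?' = '0' then z + 1 else z) (0 : Int)) > (c.length : Int) then '0' else '1') with hb
      set c' := c.filter (fun r => (PySem.Str.pyGet? r ((i : Nat) : Int)).getD '?' = b) with hc'
      have hcast : ((i : Nat) : Int) + 1 = (((i + 1 : Nat)) : Int) := by push_cast; ring
      rw [hcast]
      by_cases hce : c' = []
      · rw [hce, pvOxyLoop_nil, pvRateLoop_nil]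
      · exact ih c' (i + 1) hce
          (fun r hr => hlen r (List.mem_of_mem_filter hr))
          (fun r hr => hbin r (List.mem_of_mem_filter hr))
          (pvAgree_step c L i hi hlen hagree b)

lemma pvCo2Loop_eq (L : Nat) : ∀ (fuel : Nat) (c : List String) (i : Nat),
    c ≠ [] →
    (∀ r ∈ c, r.toList.length = L) →
    (∀ r ∈ c, ∀ ch ∈ r.toList, ch = '0' ∨ ch = '1') →
    (∀ r ∈ c, ∀ s ∈ c, r.toList.take i = s.toList.take i) →
    pvCo2Loop fuel c (i : Int) = pvRateLoop false fuel c (i : Int) := by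
  intro fuel
  induction fuel with
  | zero => intro c i _ _ _ _; rfl
  | succ f ih =>
    intro c i hne hlen hbin hagree
    by_cases hall : ∀ x ∈ c, x = c.headD ""
    · rw [pvCo2Loop_stop f c _ hne hall, pvRateLoop_stop false f c _ hall]
    · have hi : i < L := pvIdx_lt c L i hne hlen hagree hall
      have hbit : (PySem.Str.pyGet? (pvDiagnose c).2 ((i : Nat) : Int)).getD '?'
          = (if 2 * (c.foldl (fun z reading => if (PySem.Str.pyGet? reading ((i : Nat) : Int)).getD '?' = '0' then z + 1 else z) (0 : Int)) > (c.length : Int) then '1' else '0') := by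
        rw [pvZeros_eq, pvEpsilon_get c L hne hlen hbin i hi]
      simp only [pvCo2Loop, pvRateLoop, Bool.false_eq_true, if_false]
      rw [if_neg (by rw [pvSetLen_one_iff c hne]; exact hall),
          if_neg (by rw [pvCount_headD_iff c]; exact hall)]
      rw [hbit]
      set b := (if 2 * (c.foldl (fun z reading => if (PySem.Str.pyGet? reading ((i : Nat) : Int)).getD '?' = '0' then z + 1 else z) (0 : Int)) > (c.length : Int) then '1' else '0') with hb
      set c' := c.filter (fun r => (PySem.Str.pyGet? r ((i : Nat) : Int)).getD '?' = b) with hc'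
      have hcast : ((i : Nat) : Int) + 1 = (((i + 1 : Nat)) : Int) := by push_cast; ring
      rw [hcast]
      by_cases hce : c' = []
      · rw [hce, pvCo2Loop_nil, pvRateLoop_nil]
      · exact ih c' (i + 1) hce
          (fun r hr => hlen r (List.mem_of_mem_filter hr))
          (fun r hr => hbin r (List.mem_of_mem_filter hr))
          (pvAgree_step c L i hi hlen hagree b)


-- Python's lexicographic string order: a '1' beats a '0' at the first differing position
lemma pvLex_zero_lt_one (p r1 r2 : List Char) : (p ++ '0' :: r2) < (p ++ '1' :: r1) := by
  induction p with
  | nil => exact List.Lex.rel (by decide)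
  | cons c p ih => exact List.Lex.cons ih

-- in string order, a '0' at the first undetermined position cannot follow a '1'
lemma pvBit_down (L i : Nat) (hi : i < L) (a x : String)
    (hla : a.toList.length = L) (hlx : x.toList.length = L)
    (hba : ∀ ch ∈ a.toList, ch = '0' ∨ ch = '1')
    (hag : a.toList.take i = x.toList.take i)
    (hax : a ≤ x)
    (hpx : (PySem.Str.pyGet? x (i : Int)).getD '?' = '0') :
    (PySem.Str.pyGet? a (i : Int)).getD '?' = '0' := by
  have hia : i < a.toList.length := by omega
  have hix : i < x.toList.length := by omega
  rw [PySem.Str.pyGet?_natCast, List.getElem?_eq_getElem hix, Option.getD_some] at hpx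
  rw [PySem.Str.pyGet?_natCast, List.getElem?_eq_getElem hia, Option.getD_some]
  by_contra hne
  have ha1 : a.toList[i] = '1' := by
    rcases hba _ (List.getElem_mem hia) with h | h
    · exact absurd h hne
    · exact h
  have hdx : x.toList = x.toList.take i ++ '0' :: x.toList.drop (i + 1) := by
    conv_lhs => rw [← List.take_append_drop i x.toList]
    rw [List.drop_eq_getElem_cons hix, hpx]
  have hda : a.toList = x.toList.take i ++ '1' :: a.toList.drop (i + 1) := by
    conv_lhs => rw [← List.take_append_drop i a.toList]
    rw [List.drop_eq_getElem_cons hia, ha1, hag]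
  have hlt : x < a := by
    rw [String.lt_iff_toList_lt, hdx, hda]
    exact pvLex_zero_lt_one _ _ _
  exact absurd hax (not_le.mpr hlt)

-- in an ordered, prefix-agreeing, binary window the rows with bit '0' at column i form a prefix
lemma pvTakeWhile_dropWhile_filter (L i : Nat) (hi : i < L) :
    ∀ (w : List String),
    w.Pairwise (· ≤ ·) →
    (∀ r ∈ w, r.toList.length = L) →
    (∀ r ∈ w, ∀ ch ∈ r.toList, ch = '0' ∨ ch = '1') →
    (∀ r ∈ w, ∀ s ∈ w, r.toList.take i = s.toList.take i) →
    w.takeWhile (fun r => (PySem.Str.pyGet? r (i : Int)).getD '?' == '0')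
      = w.filter (fun r => (PySem.Str.pyGet? r (i : Int)).getD '?' == '0')
    ∧ w.dropWhile (fun r => (PySem.Str.pyGet? r (i : Int)).getD '?' == '0')
      = w.filter (fun r => !((PySem.Str.pyGet? r (i : Int)).getD '?' == '0')) := by
  intro w
  induction w with
  | nil => intro _ _ _ _; exact ⟨rfl, rfl⟩
  | cons a t ih =>
    intro hp hlen hbin hag
    rw [List.pairwise_cons] at hp
    by_cases hpa : ((PySem.Str.pyGet? a (i : Int)).getD '?' == '0') = true
    · obtain ⟨h1, h2⟩ := ih hp.2 (fun r hr => hlen r (by simp [hr]))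
        (fun r hr => hbin r (by simp [hr]))
        (fun r hr s hs => hag r (by simp [hr]) s (by simp [hs]))
      refine ⟨?_, ?_⟩
      · simp only [List.takeWhile_cons, List.filter_cons, hpa, if_true]
        simpa using h1
      · simp only [List.dropWhile_cons, List.filter_cons, hpa, Bool.not_true, if_true,
          Bool.false_eq_true, if_false]
        simpa using h2
    · have hpaf : ((PySem.Str.pyGet? a (i : Int)).getD '?' == '0') = false := by
        simpa using hpa
      have hrest : ∀ x ∈ t, ((PySem.Str.pyGet? x (i : Int)).getD '?' == '0') = false := by
        intro x hx
        rw [Bool.eq_false_iff]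
        intro hpx
        apply hpa
        have := pvBit_down L i hi a x (hlen a (by simp)) (hlen x (by simp [hx]))
          (hbin a (by simp)) (hag a (by simp) x (by simp [hx])) (hp.1 x hx)
          (by simpa using hpx)
        simpa using this
      refine ⟨?_, ?_⟩
      · simp only [List.takeWhile_cons, List.filter_cons, hpaf, Bool.false_eq_true, if_false]
        symm
        rw [List.filter_eq_nil_iff]
        intro x hx h'
        rw [hrest x hx] at h'
        exact absurd h' (by simp)
      · simp only [List.dropWhile_cons, List.filter_cons, hpaf, Bool.not_false,
          Bool.false_eq_true, if_false, if_true]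
        congr 1
        symm
        apply List.filter_eq_self.mpr
        intro x hx
        have h' := hrest x hx
        rw [PySem.Str.pyGet?_natCast] at h'
        simp [h']

-- the inner scan lands at lo + (length of the leading '0' block of the window)
lemma pvScan_eq (srt : List String) (i : Int) :
    ∀ (f : Nat) (lo hi : Nat), hi ≤ srt.length → f = hi - lo →
    pvScanZeros srt (hi : Int) i f (lo : Int)
      = (lo : Int) + (((srt.drop lo).take (hi - lo)).takeWhile
          (fun r => (PySem.Str.pyGet? r i).getD '?' == '0')).length := by
  intro f
  induction f with
  | zero =>
    intro lo hi _ h0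
    have h1 : hi - lo = 0 := h0.symm
    rw [h1]
    simp [pvScanZeros]
  | succ f ih =>
    intro lo hi hle h1
    have hlt : lo < hi := by omega
    have hlo : lo < srt.length := by omega
    have hdrop : srt.drop lo = srt[lo] :: srt.drop (lo + 1) := List.drop_eq_getElem_cons hlo
    have hget : PySem.List.pyGet? srt (lo : Int) = some srt[lo] := by
      rw [PySem.List.pyGet?_natCast, List.getElem?_eq_getElem hlo]
    simp only [pvScanZeros]
    have htake : hi - lo = (hi - (lo + 1)) + 1 := by omega
    rw [hdrop, htake, List.take_succ_cons]
    by_cases hb : (PySem.Str.pyGet? srt[lo] i).getD '?' = '0'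
    · rw [if_pos ⟨by exact_mod_cast hlt, by rw [hget]; simpa using hb⟩,
          List.takeWhile_cons_of_pos (by simpa using hb), List.length_cons]
      have hcast : (lo : Int) + 1 = ((lo + 1 : Nat) : Int) := by push_cast; ring
      rw [hcast, ih (lo + 1) hi hle (by omega)]
      push_cast; ring
    · rw [if_neg (by
          rintro ⟨_, hc⟩
          rw [hget] at hc
          exact hb (by simpa using hc)),
          List.takeWhile_cons_of_neg (by simpa using hb)]
      simp

lemma pvWinLen (srt : List String) (lo hi : Nat) (h2 : hi ≤ srt.length) :
    ((srt.drop lo).take (hi - lo)).length = hi - lo := by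
  rw [List.length_take, List.length_drop]
  omega

lemma pvWinGet (srt : List String) (lo hi k : Nat) (h1 : lo + k < hi) (h2 : hi ≤ srt.length) :
    ((srt.drop lo).take (hi - lo))[k]'(by rw [pvWinLen srt lo hi h2]; omega)
      = srt[lo + k]'(by omega) := by
  rw [List.getElem_take, List.getElem_drop]

lemma pvSrtMono (srt : List String) (hs : srt.Pairwise (· ≤ ·)) (p q : Nat) (hpq : p ≤ q)
    (hq : q < srt.length) : srt[p]'(by omega) ≤ srt[q] := by
  rcases Nat.lt_or_ge p q with h | h
  · exact List.pairwise_iff_getElem.mp hs p q (by omega) hq h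
  · have : p = q := by omega
    subst this
    exact le_refl _

-- the outer-loop tests agree: srt[lo] = srt[hi-1] iff the candidates hold a single distinct value
lemma pvAllEq_iff (srt : List String) (hs : srt.Pairwise (· ≤ ·)) (lo hi : Nat)
    (h1 : lo < hi) (h2 : hi ≤ srt.length) (c : List String)
    (hperm : ((srt.drop lo).take (hi - lo)).Perm c) :
    srt[lo]'(by omega) = srt[hi - 1]'(by omega) ↔ ∀ x ∈ c, x = c.headD "" := by
  have hwlen : ((srt.drop lo).take (hi - lo)).length = hi - lo := pvWinLen srt lo hi h2
  have hcne : c ≠ [] := by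
    intro h
    have := hperm.length_eq
    rw [h] at this
    simp [hwlen] at this
    omega
  have hmemw : ∀ (q : Nat) (hq1 : lo ≤ q) (hq2 : q < hi), srt[q]'(by omega) ∈ c := by
    intro q hq1 hq2
    apply hperm.mem_iff.mp
    have hk : q - lo < ((srt.drop lo).take (hi - lo)).length := by rw [hwlen]; omega
    refine List.mem_iff_getElem.mpr ⟨q - lo, hk, ?_⟩
    rw [pvWinGet srt lo hi (q - lo) (by omega) h2]
    exact getElem_congr rfl (by omega) (by omega)
  constructor
  · intro heq x hx
    have hxw := hperm.mem_iff.mpr hx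
    obtain ⟨k, hk, hxk⟩ := List.mem_iff_getElem.mp hxw
    have hxval : x = srt[lo + k]'(by rw [hwlen] at hk; omega) := by
      rw [← hxk, pvWinGet srt lo hi k (by rw [hwlen] at hk; omega) h2]
    have hhd := pvHeadD_mem c hcne
    have hhdw := hperm.mem_iff.mpr hhd
    obtain ⟨k', hk', hhk⟩ := List.mem_iff_getElem.mp hhdw
    have hhval : c.headD "" = srt[lo + k']'(by rw [hwlen] at hk'; omega) := by
      rw [← hhk, pvWinGet srt lo hi k' (by rw [hwlen] at hk'; omega) h2]
    -- every srt[q] with lo ≤ q < hi equals srt[lo]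
    have hall : ∀ (q : Nat) (hq1 : lo ≤ q) (hq2 : q < hi), srt[q]'(by omega) = srt[lo]'(by omega) := by
      intro q hq1 hq2
      have h1' : srt[lo]'(by omega) ≤ srt[q]'(by omega) := pvSrtMono srt hs lo q hq1 (by omega)
      have h2' : srt[q]'(by omega) ≤ srt[hi - 1]'(by omega) := pvSrtMono srt hs q (hi - 1) (by omega) (by omega)
      have h2'' : srt[q]'(by omega) ≤ srt[lo]'(by omega) := by rw [heq]; exact h2'
      exact le_antisymm h2'' h1' 
    rw [hxval, hhval, hall (lo + k) (by omega) (by rw [hwlen] at hk; omega)]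
    exact (hall (lo + k') (by omega) (by rw [hwlen] at hk'; omega)).symm
  · intro hall
    have h1' := hall _ (hmemw lo (le_refl _) h1)
    have h2' := hall _ (hmemw (hi - 1) (by omega) (by omega))
    rw [h1', h2']

-- B's zeros block length is A's column count of '0'
lemma pvZeros_countP (c : List String) (i : Int) :
    c.foldl (fun z reading => if (PySem.Str.pyGet? reading i).getD '?' = '0' then z + 1 else z) (0 : Int)
      = (c.countP (fun r => (PySem.Str.pyGet? r i).getD '?' == '0') : Int) := by
  rw [pvZeros_eq, PySem.List.count_eq, List.count_eq_countP, List.countP_map]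
  exact_mod_cast List.countP_congr (fun x _ => by simp [Function.comp])


lemma pvWinMem (srt : List String) (lo hi q : Nat) (hq1 : lo ≤ q) (hq2 : q < hi)
    (h2 : hi ≤ srt.length) (c : List String)
    (hperm : ((srt.drop lo).take (hi - lo)).Perm c) : srt[q]'(by omega) ∈ c := by
  apply hperm.mem_iff.mp
  have hk : q - lo < ((srt.drop lo).take (hi - lo)).length := by
    rw [pvWinLen srt lo hi h2]; omega
  refine List.mem_iff_getElem.mpr ⟨q - lo, hk, ?_⟩
  rw [pvWinGet srt lo hi (q - lo) (by omega) h2]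
  exact getElem_congr rfl (by omega) (by omega)

-- a stopped candidate list returns the window's left end
lemma pvStop_out (srt : List String) (lo hi : Nat) (h1 : lo < hi) (h2 : hi ≤ srt.length)
    (c : List String) (hperm : ((srt.drop lo).take (hi - lo)).Perm c)
    (hall : ∀ x ∈ c, x = c.headD "") :
    c.headD "" = (PySem.List.pyGet? srt (lo : Int)).getD "" := by
  have hlo : lo < srt.length := by omega
  rw [PySem.List.pyGet?_natCast, List.getElem?_eq_getElem hlo, Option.getD_some]
  exact (hall _ (pvWinMem srt lo hi lo (le_refl _) h1 h2 c hperm)).symm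

-- the filtering loop over the candidates equals the window walk over the sorted array
lemma pvWalk_eq (keep : Bool) (L : Nat) (srt : List String)
    (hs : srt.Pairwise (· ≤ ·))
    (hlenS : ∀ r ∈ srt, r.toList.length = L)
    (hbinS : ∀ r ∈ srt, ∀ ch ∈ r.toList, ch = '0' ∨ ch = '1') :
    ∀ (fuel : Nat) (lo hi i : Nat) (c : List String),
    lo < hi → hi ≤ srt.length →
    ((srt.drop lo).take (hi - lo)).Perm c →
    (∀ r ∈ c, ∀ s ∈ c, r.toList.take i = s.toList.take i) →
    L < i + fuel →
    (keep = false → pvCo2Safe c (List.range' i (L - i)) = true) →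
    (pvRateLoop keep fuel c (i : Int)).headD ""
      = (PySem.List.pyGet? srt (pvWalkLoop keep srt fuel (lo : Int) (hi : Int) (i : Int))).getD "" := by
  intro fuel
  induction fuel with
  | zero =>
    intro lo hi i c h1 h2 hperm hag hfuel _
    have hcne : c ≠ [] := by
      intro h
      have := hperm.length_eq
      rw [h, pvWinLen srt lo hi h2] at this
      simp at this
      omega
    have hmemS : ∀ r ∈ c, r ∈ srt := fun r hr =>
      List.mem_of_mem_drop (List.mem_of_mem_take (hperm.mem_iff.mpr hr))
    have hlenc : ∀ r ∈ c, r.toList.length = L := fun r hr => hlenS r (hmemS r hr)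
    have hall : ∀ x ∈ c, x = c.headD "" := by
      by_contra hnall
      have := pvIdx_lt c L i hcne hlenc hag hnall
      omega
    simp only [pvRateLoop, pvWalkLoop]
    exact pvStop_out srt lo hi h1 h2 c hperm hall
  | succ f ih =>
    intro lo hi i c h1 h2 hperm hag hfuel hco2
    have hlo : lo < srt.length := by omega
    have hhi1 : hi - 1 < srt.length := by omega
    have hcne : c ≠ [] := by
      intro h
      have := hperm.length_eq
      rw [h, pvWinLen srt lo hi h2] at this
      simp at this
      omega
    have hmemS : ∀ r ∈ c, r ∈ srt := fun r hr =>
      List.mem_of_mem_drop (List.mem_of_mem_take (hperm.mem_iff.mpr hr))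
    have hlenc : ∀ r ∈ c, r.toList.length = L := fun r hr => hlenS r (hmemS r hr)
    have hbinc : ∀ r ∈ c, ∀ ch ∈ r.toList, ch = '0' ∨ ch = '1' :=
      fun r hr => hbinS r (hmemS r hr)
    have hgetlo : PySem.List.pyGet? srt (lo : Int) = some (srt[lo]'hlo) := by
      rw [PySem.List.pyGet?_natCast, List.getElem?_eq_getElem hlo]
    have hcast1 : ((hi : Nat) : Int) - 1 = (((hi - 1) : Nat) : Int) := by omega
    have hgethi : PySem.List.pyGet? srt ((hi : Int) - 1) = some (srt[hi - 1]'hhi1) := by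
      rw [hcast1, PySem.List.pyGet?_natCast, List.getElem?_eq_getElem hhi1]
    have hiff := pvAllEq_iff srt hs lo hi h1 h2 c hperm
    by_cases hall : ∀ x ∈ c, x = c.headD ""
    · rw [pvRateLoop_stop keep f c _ hall]
      simp only [pvWalkLoop]
      rw [if_neg (by rw [hgetlo, hgethi]; simp only [Option.getD_some]
                     exact not_not_intro (hiff.mpr hall))]
      exact pvStop_out srt lo hi h1 h2 c hperm hall
    · have hil : i < L := pvIdx_lt c L i hcne hlenc hag hall
      -- the window and its '0'-block
      have hwpair : ((srt.drop lo).take (hi - lo)).Pairwise (fun a b : String => a ≤ b) :=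
        List.Pairwise.sublist ((List.take_sublist _ _).trans (List.drop_sublist _ _)) hs
      have hmemSw : ∀ r ∈ (srt.drop lo).take (hi - lo), r ∈ srt := fun r hr =>
        List.mem_of_mem_drop (List.mem_of_mem_take hr)
      obtain ⟨htw, hdw⟩ := pvTakeWhile_dropWhile_filter L i hil ((srt.drop lo).take (hi - lo))
        hwpair (fun r hr => hlenS r (hmemSw r hr)) (fun r hr => hbinS r (hmemSw r hr))
        (fun r hr s hs' => hag r (hperm.mem_iff.mp hr) s (hperm.mem_iff.mp hs'))
      have hwlen : ((srt.drop lo).take (hi - lo)).length = hi - lo := pvWinLen srt lo hi h2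
      have hzlen : (((srt.drop lo).take (hi - lo)).takeWhile
          (fun r => (PySem.Str.pyGet? r (i : Int)).getD '?' == '0')).length
          = ((srt.drop lo).take (hi - lo)).countP
              (fun r => (PySem.Str.pyGet? r (i : Int)).getD '?' == '0') := by
        rw [htw, List.countP_eq_length_filter]
      -- abbreviate
      generalize hzdef : ((srt.drop lo).take (hi - lo)).countP
          (fun r => (PySem.Str.pyGet? r (i : Int)).getD '?' == '0') = z at hzlen
      have hzle : z ≤ hi - lo := by
        rw [← hzdef]
        exact le_trans List.countP_le_length (le_of_eq hwlen)
      have hclen : c.length = hi - lo := by rw [← hperm.length_eq, hwlen]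
      have hccount : c.countP (fun r => (PySem.Str.pyGet? r (i : Int)).getD '?' == '0') = z := by
        rw [← hperm.countP_eq, hzdef]
      -- the scan finds the split point lo + z
      have hmid : pvScanZeros srt (hi : Int) i ((hi : Int) - (lo : Int)).toNat (lo : Int)
          = (lo : Int) + (z : Int) := by
        have htn : ((hi : Int) - (lo : Int)).toNat = hi - lo := by omega
        rw [htn, pvScan_eq srt (i : Int) (hi - lo) lo hi h2 rfl, hzlen]
      -- window identities
      have htake_eq : ((srt.drop lo).take (hi - lo)).takeWhile
          (fun r => (PySem.Str.pyGet? r (i : Int)).getD '?' == '0')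
          = ((srt.drop lo).take (hi - lo)).take z := by
        have := List.prefix_iff_eq_take.mp (List.takeWhile_prefix
          (fun r => (PySem.Str.pyGet? r (i : Int)).getD '?' == '0') (l := (srt.drop lo).take (hi - lo)))
        rw [hzlen] at this
        exact this
      have hdrop_eq : ((srt.drop lo).take (hi - lo)).dropWhile
          (fun r => (PySem.Str.pyGet? r (i : Int)).getD '?' == '0')
          = ((srt.drop lo).take (hi - lo)).drop z := by
        have hboth : (((srt.drop lo).take (hi - lo)).take z) ++ (((srt.drop lo).take (hi - lo)).dropWhile
            (fun r => (PySem.Str.pyGet? r (i : Int)).getD '?' == '0'))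
            = (((srt.drop lo).take (hi - lo)).take z) ++ (((srt.drop lo).take (hi - lo)).drop z) := by
          conv_lhs => rw [← htake_eq]
          rw [List.takeWhile_append_dropWhile, List.take_append_drop]
        exact List.append_cancel_left hboth
      have hWin0 : ((srt.drop lo).take (hi - lo)).take z = (srt.drop lo).take ((lo + z) - lo) := by
        rw [List.take_take, min_eq_left hzle]
        congr 1
        omega
      have hWin1 : ((srt.drop lo).take (hi - lo)).drop z
          = (srt.drop (lo + z)).take (hi - (lo + z)) := by
        rw [List.drop_take, List.drop_drop]
        congr 1
        omega
      -- permutations of the two filtered candidate lists with the two half-windows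
      have hPz : ((srt.drop lo).take ((lo + z) - lo)).Perm
          (c.filter (fun r => (PySem.Str.pyGet? r (i : Int)).getD '?' == '0')) := by
        rw [← hWin0, ← htake_eq, htw]
        exact hperm.filter _
      have hPo : ((srt.drop (lo + z)).take (hi - (lo + z))).Perm
          (c.filter (fun r => !((PySem.Str.pyGet? r (i : Int)).getD '?' == '0'))) := by
        rw [← hWin1, ← hdrop_eq, hdw]
        exact hperm.filter _
      -- rateLoop's filters with a concrete bit are these two filters
      have hfilter0 : c.filter (fun r => decide ((PySem.Str.pyGet? r (i : Int)).getD '?' = '0'))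
          = c.filter (fun r => (PySem.Str.pyGet? r (i : Int)).getD '?' == '0') :=
        List.filter_congr (fun x _ => (Bool.beq_eq_decide_eq _ _).symm)
      have hfilter1 : c.filter (fun r => decide ((PySem.Str.pyGet? r (i : Int)).getD '?' = '1'))
          = c.filter (fun r => !((PySem.Str.pyGet? r (i : Int)).getD '?' == '0')) := by
        apply List.filter_congr
        intro x hx
        have hxl : i < x.toList.length := by rwa [hlenc x hx]
        have hbx := hbinc x hx _ (List.getElem_mem hxl)
        simp only [PySem.Str.pyGet?_natCast, List.getElem?_eq_getElem hxl, Option.getD_some]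
        rcases hbx with h | h <;> simp [h]
      -- goal-side casts
      have hcast2 : (i : Int) + 1 = ((i + 1 : Nat) : Int) := by push_cast; ring
      have hcast3 : (lo : Int) + (z : Int) = ((lo + z : Nat) : Int) := by push_cast; ring
      -- conditions of the two outer ifs
      have hcondR : ¬ (PySem.List.count c (c.headD "") = c.length) :=
        fun hcc => hall ((pvCount_headD_iff c).mp hcc)
      have hcondW : (PySem.List.pyGet? srt (lo : Int)).getD ""
          ≠ (PySem.List.pyGet? srt ((hi : Int) - 1)).getD "" := by
        rw [hgetlo, hgethi]
        simp only [Option.getD_some, ne_eq]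
        exact fun he => hall (hiff.mp he)
      -- CO2 safety step, shared by both comparison outcomes (used only when keep = false)
      have hco2step : keep = false →
          (let bitc : Char := if 2 * (c.countP (fun r => (PySem.Str.pyGet? r (i : Int)).getD '?' == '0')) > c.length then '1' else '0'
           (c.filter (fun r => (PySem.Str.pyGet? r (i : Int)).getD '?' == bitc)) ≠ []
           ∧ pvCo2Safe (c.filter (fun r => (PySem.Str.pyGet? r (i : Int)).getD '?' == bitc))
               (List.range' (i + 1) (L - (i + 1))) = true) := by
        intro hk
        have H := hco2 hk
        rw [show L - i = (L - (i + 1)) + 1 by omega, List.range'_succ] at H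
        have hallF : (c.all fun r => r == c.headD "") = false := by
          rw [Bool.eq_false_iff]
          intro hT
          exact hall (fun x hx => by simpa using List.all_eq_true.mp hT x hx)
        simp only [pvCo2Safe, hallF, Bool.false_eq_true, if_false] at H
        have hcnt : c.countP (fun r => r.toList[i]? = some '0')
            = c.countP (fun r => (PySem.Str.pyGet? r (i : Int)).getD '?' == '0') := by
          apply List.countP_congr
          intro x hx
          have hxl : i < x.toList.length := by rwa [hlenc x hx]
          simp [List.getElem?_eq_getElem hxl]
        have hnext : c.filter (fun r => r.toList[i]? =
              some (if 2 * c.countP (fun r => r.toList[i]? = some '0') > c.length then '1' else '0'))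
            = c.filter (fun r => (PySem.Str.pyGet? r (i : Int)).getD '?' ==
              (if 2 * (c.countP (fun r => (PySem.Str.pyGet? r (i : Int)).getD '?' == '0')) > c.length then '1' else '0')) := by
          rw [hcnt]
          apply List.filter_congr
          intro x hx
          have hxl : i < x.toList.length := by rwa [hlenc x hx]
          simp [List.getElem?_eq_getElem hxl, Bool.beq_eq_decide_eq]
        rw [hnext] at H
        cases hE : (c.filter (fun r => (PySem.Str.pyGet? r (i : Int)).getD '?' ==
            (if 2 * (c.countP (fun r => (PySem.Str.pyGet? r (i : Int)).getD '?' == '0')) > c.length then '1' else '0'))).isEmpty with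
        | false =>
          rw [hE, if_neg (by simp)] at H
          exact ⟨fun h0 => by rw [h0] at hE; simp at hE, H⟩
        | true =>
          rw [hE, if_pos rfl] at H
          exact absurd H (by simp)
      -- unfold one step of both loops
      simp only [pvRateLoop, pvWalkLoop]
      rw [if_neg hcondR, if_pos hcondW, hmid, pvZeros_countP c (i : Int), hccount, hclen]
      -- the '1'-side filter in co2safe's form equals its canonical form
      have hF31 : c.filter (fun r => (PySem.Str.pyGet? r (i : Int)).getD '?' == '1')
          = c.filter (fun r => !((PySem.Str.pyGet? r (i : Int)).getD '?' == '0')) := by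
        apply List.filter_congr
        intro x hx
        have hxl : i < x.toList.length := by rwa [hlenc x hx]
        have hbx := hbinc x hx _ (List.getElem_mem hxl)
        simp only [PySem.Str.pyGet?_natCast, List.getElem?_eq_getElem hxl, Option.getD_some]
        rcases hbx with h | h <;> simp [h]
      by_cases hC : 2 * (z : Int) > ((hi - lo : Nat) : Int)
      · -- the '0' block is the strict majority
        have hC' : (lo : Int) + (z : Int) - (lo : Int) > (hi : Int) - ((lo : Int) + (z : Int)) := by omega
        have hCn : 2 * (c.countP (fun r => (PySem.Str.pyGet? r (i : Int)).getD '?' == '0')) > c.length := by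
          rw [hccount, hclen]; omega
        cases keep
        · -- CO2 keeps the minority: the '1' side [lo + z, hi)
          obtain ⟨hne0, Hrec⟩ := hco2step rfl
          simp only [if_pos hCn, hF31] at hne0 Hrec
          rw [if_neg (show ¬(false = true) from by simp)]
          rw [if_pos hC,
              if_neg (show ¬ ((decide ((lo : Int) + (z : Int) - (lo : Int) > (hi : Int) - ((lo : Int) + (z : Int)))) = false) from by
                simp only [decide_eq_false_iff_not, not_not]
                exact hC'),
              hfilter1, hcast2, hcast3]
          have hlt2 : lo + z < hi := by
            by_contra hge
            apply hne0
            have h0 : hi - (lo + z) = 0 := by omega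
            have hl := hPo.length_eq
            rw [h0, List.take_zero] at hl
            exact (List.length_eq_zero_iff.mp hl.symm)
          exact ih (lo + z) hi (i + 1) _ hlt2 h2 hPo
            (by rw [← hfilter1]; exact pvAgree_step c L i hil hlenc hag '1')
            (by omega) (fun _ => Hrec)
        · -- oxygen keeps the majority: the '0' side [lo, lo + z)
          have hz1 : 0 < z := by omega
          rw [if_pos (show (true = true) from rfl)]
          rw [if_pos hC, if_pos (decide_eq_true hC'), hfilter0, hcast2, hcast3]
          exact ih lo (lo + z) (i + 1) _ (by omega) (by omega) hPz
            (by rw [← hfilter0]; exact pvAgree_step c L i hil hlenc hag '0')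
            (by omega) (fun h => by cases h)
      · -- the '0' block is not the strict majority
        have hC' : ¬ ((lo : Int) + (z : Int) - (lo : Int) > (hi : Int) - ((lo : Int) + (z : Int))) := by omega
        have hCn : ¬ (2 * (c.countP (fun r => (PySem.Str.pyGet? r (i : Int)).getD '?' == '0')) > c.length) := by
          rw [hccount, hclen]; omega
        have hzlt : z < hi - lo := by omega
        cases keep
        · -- CO2 keeps the minority: the '0' side [lo, lo + z)
          obtain ⟨hne0, Hrec⟩ := hco2step rfl
          simp only [if_neg hCn] at hne0 Hrec
          rw [if_neg (show ¬(false = true) from by simp)]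
          rw [if_neg hC,
              if_pos (show (decide ((lo : Int) + (z : Int) - (lo : Int) > (hi : Int) - ((lo : Int) + (z : Int)))) = false from
                decide_eq_false hC'),
              hfilter0, hcast2, hcast3]
          have hz1 : 0 < z := by
            by_contra hz0
            apply hne0
            have h0 : (lo + z) - lo = 0 := by omega
            have hl := hPz.length_eq
            rw [h0, List.take_zero] at hl
            exact (List.length_eq_zero_iff.mp hl.symm)
          exact ih lo (lo + z) (i + 1) _ (by omega) (by omega) hPz
            (by rw [← hfilter0]; exact pvAgree_step c L i hil hlenc hag '0')
            (by omega) (fun _ => Hrec)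
        · -- oxygen keeps the majority (ties to '1'): the '1' side [lo + z, hi)
          rw [if_pos (show (true = true) from rfl)]
          rw [if_neg hC,
              if_neg (show ¬ ((decide ((lo : Int) + (z : Int) - (lo : Int) > (hi : Int) - ((lo : Int) + (z : Int)))) = true) from
                fun h => hC' (of_decide_eq_true h)),
              hfilter1, hcast2, hcast3]
          exact ih (lo + z) hi (i + 1) _ (by omega) h2 hPo
            (by rw [← hfilter1]; exact pvAgree_step c L i hil hlenc hag '1')
            (by omega) (fun h => by cases h)

-- ===== VERDICT (by name: the statement is the Claim_ definition above) =====
theorem oxygen_and_co2_ratings_spec : Claim_equal_oxygen_and_co2_ratings := by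
  intro readings _ hpre
  unfold Spec_oxygen_and_co2_ratings
  obtain ⟨hne, hcase⟩ := hpre
  have hrlen : 0 < readings.length := List.length_pos_iff.mpr hne
  have hslen : (PySem.List.sorted readings (fun x => x) false).length = readings.length :=
    PySem.List.length_sorted readings (fun x => x) false
  have hn : 0 < (PySem.List.sorted readings (fun x => x) false).length := by omega
  have hmemS : ∀ x ∈ PySem.List.sorted readings (fun x => x) false, x ∈ readings :=
    fun x hx => (PySem.List.mem_sorted readings (fun x => x) false x).mp hx
  have hget0 : PySem.List.pyGet? (PySem.List.sorted readings (fun x => x) false) ((0 : Nat) : Int)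
      = some ((PySem.List.sorted readings (fun x => x) false)[0]'hn) := by
    rw [PySem.List.pyGet?_natCast, List.getElem?_eq_getElem hn]
  have h0 : (0 : Int) = ((0 : Nat) : Int) := rfl
  simp only [oxygen_and_co2_ratings, oxygen_and_co2_ratings_alt]
  rcases hcase with hallb | ⟨hinvb, hsafe⟩
  · -- all-equal branch: both A loops stop at once and B's walk fails its first test
    have hall : ∀ x ∈ readings, x = readings.headD "" := by
      simpa [List.all_eq_true] using hallb
    have hallS : ∀ x ∈ PySem.List.sorted readings (fun x => x) false, x = readings.headD "" :=
      fun x hx => hall x (hmemS x hx)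
    have hn1 : (PySem.List.sorted readings (fun x => x) false).length - 1
        < (PySem.List.sorted readings (fun x => x) false).length := by omega
    have hgetl : PySem.List.pyGet? (PySem.List.sorted readings (fun x => x) false)
        (((PySem.List.sorted readings (fun x => x) false).length : Int) - 1)
        = some ((PySem.List.sorted readings (fun x => x) false)[(PySem.List.sorted readings (fun x => x) false).length - 1]'hn1) := by
      have hc : (((PySem.List.sorted readings (fun x => x) false).length : Nat) : Int) - 1
          = ((((PySem.List.sorted readings (fun x => x) false).length - 1 : Nat)) : Int) := by omega
      rw [hc, PySem.List.pyGet?_natCast, List.getElem?_eq_getElem hn1]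
    have hcnd : ¬ ((PySem.List.pyGet? (PySem.List.sorted readings (fun x => x) false) (0 : Int)).getD ""
        ≠ (PySem.List.pyGet? (PySem.List.sorted readings (fun x => x) false)
            (((PySem.List.sorted readings (fun x => x) false).length : Int) - 1)).getD "") := by
      rw [h0, hget0, hgetl]
      simp only [Option.getD_some, ne_eq, not_not]
      rw [hallS _ (List.getElem_mem hn), hallS _ (List.getElem_mem hn1)]
    have hv : (PySem.List.pyGet? (PySem.List.sorted readings (fun x => x) false) (0 : Int)).getD ""
        = readings.headD "" := by
      rw [h0, hget0, Option.getD_some]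
      exact hallS _ (List.getElem_mem hn)
    rw [pvOxyLoop_stop _ readings 0 hne hall, pvCo2Loop_stop _ readings 0 hne hall]
    simp only [pvWalkLoop]
    rw [if_neg hcnd, if_neg hcnd, hv]
  · -- equal-length binary branch: A's loops = the column loops = B's window walk
    have hinv : ∀ r ∈ readings, r.toList.length = (readings.headD "").toList.length ∧
        ∀ ch ∈ r.toList, ch = '0' ∨ ch = '1' := by
      simpa only [List.all_eq_true, Bool.and_eq_true, beq_iff_eq, Bool.or_eq_true] using hinvb
    have hlen : ∀ r ∈ readings, r.toList.length = (readings.headD "").toList.length :=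
      fun r hr => (hinv r hr).1
    have hbin : ∀ r ∈ readings, ∀ ch ∈ r.toList, ch = '0' ∨ ch = '1' :=
      fun r hr => (hinv r hr).2
    have hsp : (PySem.List.sorted readings (fun x => x) false).Pairwise (· ≤ ·) :=
      PySem.List.sorted_pairwise readings (fun x => x)
    have hlenS : ∀ r ∈ PySem.List.sorted readings (fun x => x) false,
        r.toList.length = (readings.headD "").toList.length :=
      fun r hr => hlen r (hmemS r hr)
    have hbinS : ∀ r ∈ PySem.List.sorted readings (fun x => x) false,
        ∀ ch ∈ r.toList, ch = '0' ∨ ch = '1' :=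
      fun r hr => hbin r (hmemS r hr)
    have hwin : ((PySem.List.sorted readings (fun x => x) false).drop 0).take
        ((PySem.List.sorted readings (fun x => x) false).length - 0)
        = PySem.List.sorted readings (fun x => x) false := by
      rw [List.drop_zero, Nat.sub_zero, List.take_length]
    have hperm : (((PySem.List.sorted readings (fun x => x) false).drop 0).take
        ((PySem.List.sorted readings (fun x => x) false).length - 0)).Perm readings := by
      rw [hwin]
      exact PySem.List.sorted_perm readings (fun x => x) false
    have hsafe' : pvCo2Safe readings
        (List.range' 0 ((readings.headD "").toList.length - 0)) = true := by
      rw [Nat.sub_zero, ← List.range_eq_range']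
      exact hsafe
    have hwalk := fun keep hco2 => pvWalk_eq keep ((readings.headD "").toList.length)
      (PySem.List.sorted readings (fun x => x) false) hsp hlenS hbinS
      ((readings.headD "").toList.length + 1) 0 ((PySem.List.sorted readings (fun x => x) false).length) 0
      readings hn (le_refl _) hperm (by simp) (by omega) hco2
    rw [h0,
        pvOxyLoop_eq ((readings.headD "").toList.length) _ readings 0 hne hlen hbin (by simp),
        pvCo2Loop_eq ((readings.headD "").toList.length) _ readings 0 hne hlen hbin (by simp)]
    rw [Prod.mk.injEq]
    constructor
    · exact hwalk true (fun h => by cases h)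
    · exact hwalk false (fun _ => hsafe')
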